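-- pv_equiv track=rewrite | github.com/agusotto96/tp_programacion_I | lib.py | contar_transiciones_y_transversiones
-- ===== SOURCE A (Python) =====
-- ADENINA = 'A'
--
-- TIMINA = 'T'
--
-- CITOSINA = 'C'
--
-- GUANINA = 'G'
--
-- def contar_transiciones_y_transversiones(a, b):
--     """
--     Cuenta cuántas transiciones y transversiones hay entre dos secuencias de ADN
--     del mismo largo.
--
--     Definiciones:
--         - Purinas: adenina (A) y guanina (G)
--         - Pirimidinas: citosina (C) y timina (T)
--         - Transición: sustitución entre purinas o entre pirimidinas
--         - Transversión: sustitución entre una purina y una pirimidina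
--
--     Parámetros:
--         - a (str): Primera secuencia de ADN.
--         - b (str): Segunda secuencia de ADN, de la misma longitud que 'a'.
--
--     Retorna:
--         - int, int: Cantidades de transiciones y transversiones, en ese orden.
--     """
--     es_purina = lambda n: n in (ADENINA, GUANINA)
--     es_pirimidina = lambda n: n in (CITOSINA, TIMINA)
--     transiciones = 0
--     transversiones = 0
--     for n1, n2 in zip(a, b):
--         if n1 == n2:
--             continue
--         elif (es_purina(n1) and es_purina(n2)) or (es_pirimidina(n1) and es_pirimidina(n2)):
--             transiciones += 1
--         else:
--             transversiones += 1
--     return transiciones, transversiones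
-- ===== SOURCE B (Python) =====
-- TRANS = frozenset([('A', 'G'), ('G', 'A'), ('C', 'T'), ('T', 'C')])
--
-- def contar_transiciones_y_transversiones(a, b):
--     pares = list(zip(a, b))
--     transiciones = sum(p in TRANS for p in pares)
--     mismatches = sum(n1 != n2 for n1, n2 in pares)
--     return transiciones, mismatches - transiciones
-- ===== Notes on version B (the rewrite author's own statement) =====
-- stated objective: alternative
-- what changed: B counts transitions as zipped pairs belonging to the fixed set of four canonical ordered pairs and derives transversions as mismatches minus transitions, instead of A's per-pair purine/pyrimidine branch with an else-accumulator.
import Mathlib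
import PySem

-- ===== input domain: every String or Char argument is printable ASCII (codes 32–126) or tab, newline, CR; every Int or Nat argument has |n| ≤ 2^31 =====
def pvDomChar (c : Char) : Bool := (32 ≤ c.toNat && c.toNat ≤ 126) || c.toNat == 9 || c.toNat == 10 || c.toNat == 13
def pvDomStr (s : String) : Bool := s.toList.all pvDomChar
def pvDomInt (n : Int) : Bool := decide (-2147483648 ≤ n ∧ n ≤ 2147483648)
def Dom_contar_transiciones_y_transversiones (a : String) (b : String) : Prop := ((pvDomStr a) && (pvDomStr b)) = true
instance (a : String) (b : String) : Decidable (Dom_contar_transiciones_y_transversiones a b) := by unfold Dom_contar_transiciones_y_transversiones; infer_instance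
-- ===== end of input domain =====

-- B counts transitions by membership in the four canonical ordered pairs and gets
-- transversions as mismatches minus transitions; same O(n) cost, different decomposition.

-- ===== PORT A =====
def pvEsPurina (n : Char) : Bool := n == 'A' || n == 'G'
def pvEsPirimidina (n : Char) : Bool := n == 'C' || n == 'T'

def pvLoopA : List (Char × Char) → Int × Int → Int × Int
  | [], s => s
  | (n1, n2) :: rest, (t, v) =>
    if n1 == n2 then pvLoopA rest (t, v)
    else if (pvEsPurina n1 && pvEsPurina n2) || (pvEsPirimidina n1 && pvEsPirimidina n2) then
      pvLoopA rest (t + 1, v)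
    else pvLoopA rest (t, v + 1)

def contar_transiciones_y_transversiones (a : String) (b : String) : Int × Int :=
  pvLoopA (a.toList.zip b.toList) (0, 0)

-- ===== PORT B =====
def pvTRANS : List (Char × Char) := [('A', 'G'), ('G', 'A'), ('C', 'T'), ('T', 'C')]

def contar_transiciones_y_transversiones_alt (a : String) (b : String) : Int × Int :=
  let pares := a.toList.zip b.toList
  let transiciones : Int := pares.countP (fun p => pvTRANS.contains p)
  let mismatches : Int := pares.countP (fun p => !(p.1 == p.2))
  (transiciones, mismatches - transiciones)

-- ===== PRECONDITION & SPEC =====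
def Spec_contar_transiciones_y_transversiones (a : String) (b : String) (out : Int × Int) : Prop := out = contar_transiciones_y_transversiones_alt a b
instance (a : String) (b : String) (out : Int × Int) : Decidable (Spec_contar_transiciones_y_transversiones a b out) := by unfold Spec_contar_transiciones_y_transversiones; infer_instance

-- ===== CLAIM (what is proved, stated in full; the proofs are below) =====
def Claim_equal_contar_transiciones_y_transversiones : Prop := ∀ (a : String) (b : String), Dom_contar_transiciones_y_transversiones a b → Spec_contar_transiciones_y_transversiones a b (contar_transiciones_y_transversiones a b)

-- ===== LEMMAS AND PROOFS =====

-- a pair is in pvTRANS iff the letters differ and are both purines or both pyrimidines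
lemma pvKey (n1 n2 : Char) :
    pvTRANS.contains (n1, n2) =
      (!(n1 == n2) && ((pvEsPurina n1 && pvEsPurina n2) || (pvEsPirimidina n1 && pvEsPirimidina n2))) := by
  rw [Bool.eq_iff_iff]
  simp only [List.contains_iff_mem, pvTRANS, List.mem_cons, List.not_mem_nil, or_false,
    Prod.mk.injEq, Bool.and_eq_true, Bool.or_eq_true, Bool.not_eq_true', beq_eq_false_iff_ne,
    ne_eq, pvEsPurina, pvEsPirimidina, beq_iff_eq]
  constructor
  · rintro (⟨rfl, rfl⟩ | ⟨rfl, rfl⟩ | ⟨rfl, rfl⟩ | ⟨rfl, rfl⟩) <;> simp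
  · rintro ⟨hne, (⟨h1 | h1, h2 | h2⟩ | ⟨h1 | h1, h2 | h2⟩)⟩ <;> subst h1 <;> subst h2 <;> simp_all

lemma pvLoopA_eq (l : List (Char × Char)) (t v : Int) :
    pvLoopA l (t, v) =
      (t + (l.countP (fun p => pvTRANS.contains p) : Int),
       v + ((l.countP (fun p => !(p.1 == p.2)) : Int) - (l.countP (fun p => pvTRANS.contains p) : Int))) := by
  induction l generalizing t v with
  | nil => simp [pvLoopA]
  | cons p rest ih =>
    obtain ⟨n1, n2⟩ := p
    have hk := pvKey n1 n2
    by_cases h : (n1 == n2) = true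
    · have h1 : (n1, n2) ∉ pvTRANS := by
        rw [← List.contains_iff_mem, hk, h]; simp
      simp [pvLoopA, h, h1, ih]
    · have h' : (n1 == n2) = false := by simp_all
      by_cases h2 : ((pvEsPurina n1 && pvEsPurina n2) || (pvEsPirimidina n1 && pvEsPirimidina n2)) = true
      · have h1 : (n1, n2) ∈ pvTRANS := by
          rw [← List.contains_iff_mem, hk, h', h2]; rfl
        simp [pvLoopA, h', h2, h1, ih]
        omega
      · have h1 : (n1, n2) ∉ pvTRANS := by
          rw [← List.contains_iff_mem, hk]; simp_all
        simp [pvLoopA, h', h2, h1, ih]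
        omega

-- ===== VERDICT (by name: the statement is the Claim_ definition above) =====
theorem contar_transiciones_y_transversiones_spec : Claim_equal_contar_transiciones_y_transversiones := by
  intro a b _
  unfold Spec_contar_transiciones_y_transversiones contar_transiciones_y_transversiones contar_transiciones_y_transversiones_alt
  rw [pvLoopA_eq]
  simp
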